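-- pv_equiv track=rewrite | github.com/kisunpoke/stk-bot | src/user_commands.py | argparser
-- ===== SOURCE A (Python) =====
-- def argparser(params):
--     """For commands that use pagination, mods, and a variable first parameter.
--
--     Returns `(<first param>, page, mod)`.
--     The variable parameter *must* come first. Defaults are:
--     - `param_1 = None`
--     - `page = 1`, any `int` less than 1000
--     - `mod = None`, valid mods are `["NM", "HD", "HR", "DT", "FM"]`."""
--     param_1 = None
--     page = 1
--     mod = None
--     #try to determine what the mods and pages are, last param to first
--     #if we parse something that's clearly not a number or a mod we assume the remainder
--     #composes the first parameter
--     for index in range(1,len(params)+1):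
--             if params[-index].upper() in ["NM", "HD", "HR", "DT", "FM"]:
--                 #fields in mongodb are case-sensitive
--                 mod = params[-index].upper()
--             elif params[-index].isdigit() and int(params[-index])<1000:
--                 page = int(params[-index])
--             else:
--                 #the remainder is assumed to be the first parameter, at which point we stop
--                 if index == 1:
--                     #slicing from zero doesn't work
--                     param_1 = " ".join(params)
--                 else:
--                     param_1 = " ".join(params[:-(index-1)])
--                 break
--     return (param_1, page, mod)
-- ===== SOURCE B (Python) =====
-- MODS = {"NM", "HD", "HR", "DT", "FM"}
--
-- def _parseable(t):
--     return t.upper() in MODS or (t.isdigit() and int(t) < 1000)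
--
-- def argparser(params):
--     # find the start of the maximal trailing run of parseable tokens
--     split = len(params)
--     while split > 0 and _parseable(params[split - 1]):
--         split -= 1
--     param_1 = " ".join(params[:split]) if split > 0 else None
--     # left-to-right over the trailing run: the earliest mod/page token wins
--     page = None
--     mod = None
--     for t in params[split:]:
--         u = t.upper()
--         if u in MODS:
--             if mod is None:
--                 mod = u
--         elif page is None:
--             page = int(t)
--     return (param_1, 1 if page is None else page, mod)
-- ===== Notes on version B (the rewrite author's own statement) =====
-- stated objective: alternative
-- what changed: A parses right-to-left in one pass with overwriting and an in-loop break computing the join slice; B first finds the split point of the maximal trailing run of parseable tokens, joins params[:split] once, then makes a single left-to-right first-token-wins pass over params[split:].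
import Mathlib
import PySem

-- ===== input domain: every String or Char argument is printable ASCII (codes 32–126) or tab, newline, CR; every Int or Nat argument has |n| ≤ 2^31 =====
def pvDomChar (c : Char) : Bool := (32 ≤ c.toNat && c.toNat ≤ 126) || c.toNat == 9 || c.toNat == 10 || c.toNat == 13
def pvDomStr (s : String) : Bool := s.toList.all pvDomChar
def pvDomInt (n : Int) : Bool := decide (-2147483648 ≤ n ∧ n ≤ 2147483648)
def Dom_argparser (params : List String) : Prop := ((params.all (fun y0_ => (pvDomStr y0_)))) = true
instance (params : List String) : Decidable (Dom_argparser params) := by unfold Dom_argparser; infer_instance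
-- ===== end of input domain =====

-- B re-implements A by a different decomposition (find the split point of the trailing
-- parseable run first, then one forward pass over the run); same return value, no speed claim.

-- shared token classification (the literal conditions both Pythons test)
def pvModTok (t : String) : Bool :=
  (["NM", "HD", "HR", "DT", "FM"] : List String).contains (PySem.Str.upper t)

def pvDigTok (t : String) : Bool :=
  PySem.Str.strIsdigit t && decide ((PySem.Int.ofStr? t).getD 0 < 1000)

-- ===== PORT A =====
-- A's loop: `for index in range(1, len(params)+1)` over params[-index], with break.
def argparserLoop (params : List String) (index : Nat) (page : Int) (mod : Option String) :
    Option String × Int × Option String :=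
  if _h : index ≤ params.length then
    let t := (PySem.List.pyGet? params (-(index : Int))).getD ""
    if pvModTok t then
      argparserLoop params (index + 1) page (some (PySem.Str.upper t))
    else if pvDigTok t then
      argparserLoop params (index + 1) ((PySem.Int.ofStr? t).getD 0) mod
    else
      (some (PySem.Str.join " "
          (if index = 1 then params else PySem.List.slice params none (some (1 - (index : Int))))),
        page, mod)
  else (none, page, mod)
termination_by params.length + 1 - index

def argparser (params : List String) : Option String × Int × Option String :=
  argparserLoop params 1 1 none

-- ===== PORT B =====
def pvParseable (t : String) : Bool := pvModTok t || pvDigTok t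

-- Source B's `while split > 0 and _parseable(params[split-1]): split -= 1`
def pvFindSplit (params : List String) : Nat → Nat
  | 0 => 0
  | s + 1 =>
    if pvParseable ((PySem.List.pyGet? params ((s : Nat) : Int)).getD "") then
      pvFindSplit params s
    else s + 1

def argparser_alt (params : List String) : Option String × Int × Option String :=
  let split := pvFindSplit params params.length
  let param_1 :=
    if 0 < split then
      some (PySem.Str.join " " (PySem.List.slice params none (some (split : Int))))
    else none
  -- forward pass over params[split:]; the earliest mod/page token wins
  let st := (PySem.List.slice params (some (split : Int)) none).foldl
    (fun (st : Option Int × Option String) t =>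
      if pvModTok t then
        (st.1, match st.2 with
          | none => some (PySem.Str.upper t)
          | some m => some m)
      else
        match st.1 with
        | none => (some ((PySem.Int.ofStr? t).getD 0), st.2)
        | some p => (some p, st.2)) (none, none)
  (param_1, st.1.getD 1, st.2)

-- ===== PRECONDITION & SPEC =====
def Spec_argparser (params : List String) (out : Option String × Int × Option String) : Prop := out = argparser_alt params
instance (params : List String) (out : Option String × Int × Option String) : Decidable (Spec_argparser params out) := by unfold Spec_argparser; infer_instance

-- ===== CLAIM (what is proved, stated in full; the proofs are below) =====
def Claim_equal_argparser : Prop := ∀ (params : List String), Dom_argparser params → Spec_argparser params (argparser params)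

-- ===== LEMMAS AND PROOFS =====

-- first page-like / mod token of a segment (proof-side characterisation of both loops)
def fpPage (l : List String) : Option Int :=
  (l.find? (fun t => !pvModTok t)).map (fun t => (PySem.Int.ofStr? t).getD 0)

def fpMod (l : List String) : Option String :=
  (l.find? pvModTok).map PySem.Str.upper

lemma fpPage_append (l₁ l₂ : List String) :
    fpPage (l₁ ++ l₂) = (fpPage l₁).or (fpPage l₂) := by
  simp [fpPage, List.find?_append]; cases l₁.find? (fun t => !pvModTok t) <;> simp

lemma fpMod_append (l₁ l₂ : List String) :
    fpMod (l₁ ++ l₂) = (fpMod l₁).or (fpMod l₂) := by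
  simp [fpMod, List.find?_append]; cases l₁.find? pvModTok <;> simp

lemma fpPage_singleton_mod {t : String} (h : pvModTok t = true) : fpPage [t] = none := by
  simp [fpPage, List.find?, h]

lemma fpMod_singleton_mod {t : String} (h : pvModTok t = true) :
    fpMod [t] = some (PySem.Str.upper t) := by
  simp [fpMod, List.find?, h]

lemma fpPage_singleton_dig {t : String} (h : pvModTok t = false) :
    fpPage [t] = some ((PySem.Int.ofStr? t).getD 0) := by
  simp [fpPage, List.find?, h]

lemma fpMod_singleton_dig {t : String} (h : pvModTok t = false) : fpMod [t] = none := by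
  simp [fpMod, List.find?, h]

lemma findSplit_le (params : List String) : ∀ s, pvFindSplit params s ≤ s := by
  intro s; induction s with
  | zero => simp [pvFindSplit]
  | succ s ih => simp only [pvFindSplit]; split <;> omega

lemma findSplit_parseable (params : List String) :
    ∀ s, s ≤ params.length → ∀ i, pvFindSplit params s ≤ i → i < s →
      pvParseable (params.getD i "") = true := by
  intro s; induction s with
  | zero => intro _ i _ hi; omega
  | succ s ih =>
    intro hs i hle hlt
    simp only [pvFindSplit] at hle
    split at hle
    · rename_i hp
      rcases Nat.lt_succ_iff_lt_or_eq.mp hlt with h | h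
      · exact ih (by omega) i hle h
      · subst h
        rwa [PySem.List.pyGet?_natCast, ← List.getD_eq_getElem?_getD] at hp
    · omega

lemma findSplit_break (params : List String) :
    ∀ s, s ≤ params.length → 0 < pvFindSplit params s →
      pvParseable (params.getD (pvFindSplit params s - 1) "") = false := by
  intro s; induction s with
  | zero => intro _ h; simp [pvFindSplit] at h
  | succ s ih =>
    intro hs hpos
    by_cases hp : pvParseable ((PySem.List.pyGet? params ((s : Nat) : Int)).getD "") = true
    · rw [pvFindSplit, if_pos hp] at hpos ⊢
      exact ih (by omega) hpos
    · rw [pvFindSplit, if_neg hp]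
      simp only [Nat.add_sub_cancel]
      rw [PySem.List.pyGet?_natCast, ← List.getD_eq_getElem?_getD] at hp
      exact Bool.not_eq_true _ ▸ eq_false_of_ne_true hp

-- B's fold over a segment, characterised by the first matching tokens
lemma foldB_eq (l : List String) :
    ∀ (p : Option Int) (m : Option String),
      l.foldl
        (fun (st : Option Int × Option String) t =>
          if pvModTok t then
            (st.1, match st.2 with
              | none => some (PySem.Str.upper t)
              | some m => some m)
          else
            match st.1 with
            | none => (some ((PySem.Int.ofStr? t).getD 0), st.2)
            | some p => (some p, st.2)) (p, m)
      = (p.or (fpPage l), m.or (fpMod l)) := by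
  induction l with
  | nil => intro p m; simp [fpPage, fpMod]
  | cons t l ih =>
    intro p m
    by_cases hm : pvModTok t
    · cases m <;>
        simp [List.foldl_cons, hm, ih, fpPage, fpMod]
    · rw [Bool.not_eq_true] at hm
      cases p <;>
        simp [List.foldl_cons, hm, ih, fpPage, fpMod]

-- A's loop, characterised via the split point and the remaining forward segment
lemma loopA_eq (params : List String) :
    ∀ (k index : Nat) (page : Int) (mod : Option String),
      1 ≤ index →
      index + pvFindSplit params params.length + k = params.length + 1 →
      argparserLoop params index page mod =
        ((if pvFindSplit params params.length = 0 then none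
          else some (PySem.Str.join " " (params.take (pvFindSplit params params.length)))),
         (fpPage ((params.drop (pvFindSplit params params.length)).take k)).getD page,
         (fpMod ((params.drop (pvFindSplit params params.length)).take k)).or mod) := by
  set split := pvFindSplit params params.length with hsplit
  have hsle : split ≤ params.length := findSplit_le params _
  intro k; induction k with
  | zero =>
    intro index page mod h1 hsum
    rw [argparserLoop]
    by_cases hin : index ≤ params.length
    · -- split > 0, the token at split-1 is unparseable: break branch
      have hs0 : 0 < split := by omega
      have hbreak := findSplit_break params params.length (le_refl _) (hsplit ▸ hs0)
      have hidx : params.length - index = split - 1 := by omega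
      have hget : (PySem.List.pyGet? params (-(index : Int))).getD "" = params.getD (split - 1) "" := by
        rw [PySem.List.pyGet?_neg_natCast params index (by omega) hin, hidx,
          List.getD_eq_getElem?_getD]
      rw [← hsplit] at hbreak
      have hmod : pvModTok (params.getD (split - 1) "") = false := by
        simp [pvParseable] at hbreak; exact hbreak.1
      have hdig : pvDigTok (params.getD (split - 1) "") = false := by
        simp [pvParseable] at hbreak; exact hbreak.2
      simp only [hin, dite_true, hget, hmod, hdig, if_false, Bool.false_eq_true]
      have hp1 : (if index = 1 then params
          else PySem.List.slice params none (some (1 - (index : Int)))) = params.take split := by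
        by_cases hone : index = 1
        · subst hone
          have : split = params.length := by omega
          simp [this]
        · have h2 : 2 ≤ index := by omega
          have hcast : (1 - (index : Int)) = -(((index - 1 : Nat) : Int)) := by
            omega
          rw [if_neg hone, hcast,
            PySem.List.slice_to_neg_natCast params (index - 1) (by omega)]
          congr 1; omega
      rw [hp1]
      simp [fpPage, fpMod, if_neg (by omega : ¬ split = 0)]
    · -- split = 0, index = length+1: loop falls through
      have hs0 : split = 0 := by omega
      simp [hin, hs0, fpPage, fpMod]
  | succ k ih =>
    intro index page mod h1 hsum
    have hin : index ≤ params.length := by omega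
    have hik : params.length - index = split + k := by omega
    have hklt : split + k < params.length := by omega
    have hget : (PySem.List.pyGet? params (-(index : Int))).getD "" = params.getD (split + k) "" := by
      rw [PySem.List.pyGet?_neg_natCast params index (by omega) hin, hik,
        List.getD_eq_getElem?_getD]
    have hpars : pvParseable (params.getD (split + k) "") = true :=
      findSplit_parseable params params.length (le_refl _) (split + k)
        (by omega) hklt
    set t := params.getD (split + k) "" with ht
    have hseg : (params.drop split).take (k + 1) = (params.drop split).take k ++ [t] := by
      rw [List.take_add_one]
      congr 1
      rw [List.getElem?_drop]
      rw [ht, List.getD_eq_getElem?_getD, List.getElem?_eq_getElem hklt]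
      rfl
    rw [argparserLoop]
    simp only [hin, dite_true, hget]
    by_cases hm : pvModTok t
    · rw [if_pos hm, ih (index + 1) page (some (PySem.Str.upper t)) (by omega) (by omega)]
      rw [hseg, fpPage_append, fpMod_append, fpPage_singleton_mod hm, fpMod_singleton_mod hm]
      cases fpMod ((params.drop split).take k) <;> simp
    · rw [Bool.not_eq_true] at hm
      have hd : pvDigTok t = true := by
        simp [pvParseable, hm] at hpars; exact hpars
      rw [if_neg (by simp [hm]), if_pos hd,
        ih (index + 1) ((PySem.Int.ofStr? t).getD 0) mod (by omega) (by omega)]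
      rw [hseg, fpPage_append, fpMod_append, fpPage_singleton_dig hm, fpMod_singleton_dig hm]
      cases fpPage ((params.drop split).take k) <;> simp

-- ===== VERDICT (by name: the statement is the Claim_ definition above) =====
theorem argparser_spec : Claim_equal_argparser := by
  intro params _
  unfold Spec_argparser argparser argparser_alt
  set split := pvFindSplit params params.length with hsplit
  have hsle : split ≤ params.length := findSplit_le params _
  have hloop := loopA_eq params (params.length - split) 1 1 none (le_refl _) (by omega)
  rw [← hsplit] at hloop
  have htake : (params.drop split).take (params.length - split) = params.drop split := by
    rw [List.take_of_length_le (by simp)]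
  rw [hloop, htake]
  simp only [PySem.List.slice_from_natCast, PySem.List.slice_to_natCast, foldB_eq]
  by_cases h0 : split = 0
  · simp [h0]
  · simp [h0, Nat.pos_of_ne_zero h0]
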